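-- pv_equiv track=rewrite | github.com/and-sang/thinkpython | ch_9_case_study_word_play/ex_9_6_is_abecedarian.py | is_abecedarian
-- ===== SOURCE A (Python) =====
-- def is_abecedarian(word):
--     '''return True if all characters in word are found in s
--     '''
--     i = 0
--     for char in word:
--         if ord(char) < i:
--             return False
--         else:
--             i = ord(char)
--     return True
-- ===== SOURCE B (Python) =====
-- def is_abecedarian(word):
--     return list(word) == sorted(word)
-- ===== Notes on version B (the rewrite author's own statement) =====
-- stated objective: idiomatic
-- what changed: Replaces A's single monotone scan tracking the previous ord with a sort-then-compare: B sorts the characters and checks the word already equals its sorted order.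
import Mathlib
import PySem

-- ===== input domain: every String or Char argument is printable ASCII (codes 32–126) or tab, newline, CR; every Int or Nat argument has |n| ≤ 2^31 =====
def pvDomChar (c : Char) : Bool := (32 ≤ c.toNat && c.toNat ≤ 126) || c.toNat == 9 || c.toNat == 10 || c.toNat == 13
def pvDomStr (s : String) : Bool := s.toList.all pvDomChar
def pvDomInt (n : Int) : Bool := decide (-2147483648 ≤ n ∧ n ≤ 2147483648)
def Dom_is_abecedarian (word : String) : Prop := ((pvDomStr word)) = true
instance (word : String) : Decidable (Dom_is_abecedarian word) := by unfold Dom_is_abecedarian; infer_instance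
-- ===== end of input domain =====

-- B replaces A's single scan (comparing each ord to the previous) with sort-then-compare:
-- the word equals its sorted character list; same return value, different algorithm.

-- ===== PORT A =====
-- the for-loop with early return False, state i : Int (starts at 0, becomes ord(char))
def isAbcLoop (i : Int) (l : List Char) : Bool :=
  match l with
  | [] => true
  | c :: cs => if (c.toNat : Int) < i then false else isAbcLoop (c.toNat : Int) cs

def is_abecedarian (word : String) : Bool := isAbcLoop 0 word.toList

-- ===== PORT B =====
def is_abecedarian_alt (word : String) : Bool :=
  word.toList == PySem.List.sorted word.toList (fun c => c) false

-- ===== PRECONDITION & SPEC =====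
def Spec_is_abecedarian (word : String) (out : Bool) : Prop := out = is_abecedarian_alt word
instance (word : String) (out : Bool) : Decidable (Spec_is_abecedarian word out) := by unfold Spec_is_abecedarian; infer_instance

-- ===== CLAIM (what is proved, stated in full; the proofs are below) =====
def Claim_equal_is_abecedarian : Prop := ∀ (word : String), Dom_is_abecedarian word → Spec_is_abecedarian word (is_abecedarian word)

-- ===== LEMMAS AND PROOFS =====

theorem isAbcLoop_cons (i : Int) (c : Char) (cs : List Char) :
    isAbcLoop i (c :: cs) = true ↔ (i ≤ (c.toNat : Int) ∧ isAbcLoop (c.toNat : Int) cs = true) := by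
  simp only [isAbcLoop]
  split
  · simp; omega
  · simp; omega

theorem char_le_iff_toNat (c d : Char) : c ≤ d ↔ (c.toNat : Int) ≤ (d.toNat : Int) := by
  rw [Char.le_def, UInt32.le_iff_toNat_le]
  exact (Int.ofNat_le ..).symm

theorem isAbcLoop_iff_chain (l : List Char) (i : Int) :
    isAbcLoop i l = true ↔
      ((∀ c, l.head? = some c → i ≤ (c.toNat : Int)) ∧ l.IsChain (· ≤ ·)) := by
  induction l generalizing i with
  | nil => simp [isAbcLoop]
  | cons c cs ih =>
    rw [isAbcLoop_cons, ih]
    constructor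
    · rintro ⟨h1, h2, h3⟩
      refine ⟨by simpa using h1, ?_⟩
      cases cs with
      | nil => exact List.IsChain.singleton c
      | cons d ds =>
        refine List.isChain_cons_cons.mpr ⟨?_, h3⟩
        have := h2 d (by simp)
        rw [char_le_iff_toNat]; omega
    · rintro ⟨h1, h2⟩
      refine ⟨by simpa using h1 c, ?_, h2.tail⟩
      intro d hd
      cases cs with
      | nil => simp at hd
      | cons e es =>
        simp at hd
        subst hd
        have := (List.isChain_cons_cons.mp h2).1
        rw [char_le_iff_toNat] at this
        omega

theorem alt_iff_pairwise (l : List Char) :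
    (l == PySem.List.sorted l (fun c => c) false) = true ↔ l.Pairwise (· ≤ ·) := by
  rw [beq_iff_eq]
  constructor
  · intro h
    have := PySem.List.sorted_pairwise (xs := l) (key := fun c => c)
    rw [← h] at this
    exact this
  · intro h
    exact (PySem.List.sorted_eq_self_of_pairwise l (fun c => c) h).symm

-- ===== VERDICT (by name: the statement is the Claim_ definition above) =====
theorem is_abecedarian_spec : Claim_equal_is_abecedarian := by
  intro word _
  unfold Spec_is_abecedarian is_abecedarian is_abecedarian_alt
  rw [Bool.eq_iff_iff, isAbcLoop_iff_chain, alt_iff_pairwise,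
    ← List.isChain_iff_pairwise]
  constructor
  · exact fun h => h.2
  · intro h
    exact ⟨fun c _ => by positivity, h⟩
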